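-- pv_equiv track=rewrite | github.com/merpury/Optimization | L02/P5.py | numsys
-- ===== SOURCE A (Python) =====
-- def dec_to_hex(num):
--     if num >= 10:
--         if num == 10:
--             return 'a'
--         elif num == 11:
--             return 'b'
--         elif num == 12:
--             return 'c'
--         elif num == 13:
--             return 'd'
--         elif num == 14:
--             return 'e'
--         elif num == 15:
--             return 'f'
--         else:
--             return -1
--     return str(num)
--
-- def numsys(dec_num):
--     binary_divider = 2
--     binary_result = ""
--
--     hex_divider = 16
--     hex_result = ""
--
--     binary_divided = dec_num
--     hex_divided = dec_num
--
--     while True: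
--         binary_buffer = binary_divided % binary_divider
--         binary_divided = binary_divided // binary_divider
--         binary_result += str(binary_buffer)
--
--         if binary_divided == 0:
--             break
--
--     while True:
--         hex_buffer = hex_divided % hex_divider
--         hex_divided = hex_divided // hex_divider
--         hex_result += dec_to_hex(hex_buffer)
--
--         if hex_divided == 0:
--             break
--
--     binary_result = "0b" + binary_result[::-1]
--     hex_result = "0x" + hex_result[::-1]
--
--     return (binary_result, hex_result)
-- ===== SOURCE B (Python) =====
-- def numsys(dec_num):
--     digits = "0123456789abcdef"
--
--     def to_base(n, base):
--         if n < base: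
--             return digits[n]
--         return to_base(n // base, base) + digits[n % base]
--
--     return ("0b" + to_base(dec_num, 2), "0x" + to_base(dec_num, 16))
-- ===== Notes on version B (the rewrite author's own statement) =====
-- stated objective: simpler
-- what changed: Replaces A's two do-while division loops with string-reversal and the if-chain digit map by a single recursive helper that builds each representation most-significant-digit first via a digit-alphabet table lookup.
import Mathlib
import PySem

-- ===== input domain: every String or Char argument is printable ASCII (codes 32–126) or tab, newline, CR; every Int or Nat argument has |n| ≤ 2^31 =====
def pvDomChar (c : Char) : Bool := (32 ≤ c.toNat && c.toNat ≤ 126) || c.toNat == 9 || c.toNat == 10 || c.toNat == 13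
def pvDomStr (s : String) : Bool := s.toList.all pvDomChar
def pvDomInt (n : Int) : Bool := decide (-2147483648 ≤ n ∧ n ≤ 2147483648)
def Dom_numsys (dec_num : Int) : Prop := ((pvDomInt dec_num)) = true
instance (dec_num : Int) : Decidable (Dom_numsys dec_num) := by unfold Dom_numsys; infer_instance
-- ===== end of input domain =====

-- B replaces A's two do-while division loops (LSB-first + reversal, if-chain digit map)
-- by one recursive helper building each representation MSB-first from a digit-alphabet table (objective: simpler).
-- Pre_numsys excludes negative inputs, on which Python A's floor-division loop never terminates there.


-- ===== PORT A =====
-- dec_to_hex: A's if-chain digit map.  The final 'return -1' branch is unreachable at A's call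
-- site (its argument is n % 16 ∈ [0,16)); Python would raise TypeError on 'str += -1' there,
-- so we port that dead branch as the characters of str(-1).
def dec_to_hex (num : Int) : List Char :=
  if num ≥ 10 then
    if num = 10 then ['a']
    else if num = 11 then ['b']
    else if num = 12 then ['c']
    else if num = 13 then ['d']
    else if num = 14 then ['e']
    else if num = 15 then ['f']
    else ['-', '1']
  else PySem.Int.toChars num

-- Both of A's 'while True: buffer = d % divider; d = d // divider; result += dig(buffer); if d == 0: break'
-- loops have this exact shape; fuel makes the Lean function total (the Python loop diverges for
-- negative input, which Pre_numsys excludes; fuel = |dec_num| + 1 is enough on 0 ≤ dec_num).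
def pyDivLoop (divider : Int) (dig : Int → List Char) : Nat → Int → List Char → List Char
  | 0, _, result => result
  | fuel + 1, divided, result =>
      let buffer := PySem.Int.mod divided divider
      let divided' := PySem.Int.floordiv divided divider
      let result' := result ++ dig buffer
      if divided' = 0 then result' else pyDivLoop divider dig fuel divided' result'

def numsys (dec_num : Int) : String × String :=
  -- result[::-1] is list reversal (PySem.List.slice?_none_none_neg_one)
  (String.ofList ('0' :: 'b' :: (pyDivLoop 2 (fun b => PySem.Int.toChars b) (dec_num.natAbs + 1) dec_num []).reverse),
   String.ofList ('0' :: 'x' :: (pyDivLoop 16 dec_to_hex (dec_num.natAbs + 1) dec_num []).reverse))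

-- ===== PORT B =====
-- digits = "0123456789abcdef"
def pvAlphabet : List Char := ['0','1','2','3','4','5','6','7','8','9','a','b','c','d','e','f']

-- digits[n]; Python raises IndexError out of range (unreachable at B's call sites), ported with getD
def pvDigit (n : Int) : Char := (PySem.List.pyGet? pvAlphabet n).getD ' '

-- def to_base(n, base): if n < base: return digits[n]; return to_base(n // base, base) + digits[n % base]
-- (fuel for Lean totality only; n + 1 is enough on 0 ≤ n)
def toBase (fuel : Nat) (n : Int) (base : Int) : List Char :=
  match fuel with
  | 0 => []
  | fuel + 1 =>
      if n < base then [pvDigit n]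
      else toBase fuel (PySem.Int.floordiv n base) base ++ [pvDigit (PySem.Int.mod n base)]

def numsys_alt (dec_num : Int) : String × String :=
  (String.ofList ('0' :: 'b' :: toBase (dec_num.natAbs + 1) dec_num 2),
   String.ofList ('0' :: 'x' :: toBase (dec_num.natAbs + 1) dec_num 16))

-- ===== PRECONDITION & SPEC =====
-- Pre_ excludes negative inputs: there Python A's '//' floor-division loop never reaches zero, so A diverges.
def Pre_numsys (dec_num : Int) : Prop := 0 ≤ dec_num
instance (dec_num : Int) : Decidable (Pre_numsys dec_num) := by unfold Pre_numsys; infer_instance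
def pvWitness_numsys : Int := (10)

def Spec_numsys (dec_num : Int) (out : String × String) : Prop := out = numsys_alt dec_num
instance (dec_num : Int) (out : String × String) : Decidable (Spec_numsys dec_num out) := by unfold Spec_numsys; infer_instance

-- ===== CLAIM (what is proved, stated in full; the proofs are below) =====
def Claim_equal_numsys : Prop := ∀ (dec_num : Int), Dom_numsys dec_num → Pre_numsys dec_num → Spec_numsys dec_num (numsys dec_num)

-- ===== LEMMAS AND PROOFS =====

-- the central correspondence: A's loop produces B's digit string reversed
lemma pyDivLoop_eq_toBase (base : Int) (digA : Int → List Char)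
    (hb : 2 ≤ base)
    (hdig : ∀ k : Int, 0 ≤ k → k < base → digA k = [pvDigit k]) :
    ∀ (fuel : Nat) (n : Int) (acc : List Char), 0 ≤ n → n < (fuel : Int) →
      pyDivLoop base digA fuel n acc = acc ++ (toBase fuel n base).reverse := by
  intro fuel
  induction fuel with
  | zero => intro n acc h0 h1; omega
  | succ fuel ih =>
    intro n acc h0 h1
    have hbpos : (0:Int) < base := by omega
    have hmod0 : 0 ≤ PySem.Int.mod n base := PySem.Int.mod_nonneg n hbpos
    have hmodlt : PySem.Int.mod n base < base := PySem.Int.mod_lt n hbpos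
    by_cases hlt : n < base
    · -- one iteration: n % base = n, n // base = 0
      have hd : PySem.Int.floordiv n base = 0 := by
        rw [PySem.Int.floordiv_eq_iff_of_pos hbpos]; constructor <;> omega
      have hm : PySem.Int.mod n base = n := by
        have h := PySem.Int.floordiv_mul_add_mod n base
        rw [hd] at h; simp at h; omega
      simp [pyDivLoop, toBase, hd, hlt, hm, hdig n h0 hlt]
    · -- recursing iteration
      have hge : base ≤ n := by omega
      have hd1 : 1 ≤ PySem.Int.floordiv n base := by
        rw [PySem.Int.le_floordiv_iff_mul_le hbpos]; omega
      have hdlt : PySem.Int.floordiv n base < n := by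
        rw [PySem.Int.floordiv_lt_iff_lt_mul hbpos]; nlinarith
      have hne : ¬ (PySem.Int.floordiv n base = 0) := by omega
      have hrec := ih (PySem.Int.floordiv n base) (acc ++ digA (PySem.Int.mod n base))
        (by omega) (by omega)
      simp only [pyDivLoop, toBase, if_neg hlt, hne, if_false,
        hdig (PySem.Int.mod n base) hmod0 hmodlt]
      rw [hdig (PySem.Int.mod n base) hmod0 hmodlt] at hrec
      rw [hrec]
      simp

lemma bin_dig_eq (k : Int) (h0 : 0 ≤ k) (h2 : k < 2) :
    PySem.Int.toChars k = [pvDigit k] := by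
  have : k = 0 ∨ k = 1 := by omega
  rcases this with h | h <;> subst h <;> decide

lemma hex_dig_eq (k : Int) (h0 : 0 ≤ k) (h16 : k < 16) :
    dec_to_hex k = [pvDigit k] := by
  interval_cases k <;> decide

-- ===== VERDICT (by name: the statement is the Claim_ definition above) =====
theorem numsys_spec : Claim_equal_numsys := by
  intro dec_num _ hpre
  unfold Spec_numsys numsys numsys_alt
  have hlt : dec_num < ((dec_num.natAbs + 1 : Nat) : Int) := by omega
  rw [pyDivLoop_eq_toBase 2 (fun b => PySem.Int.toChars b) (by omega) bin_dig_eq _ _ _ hpre hlt,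
      pyDivLoop_eq_toBase 16 dec_to_hex (by omega) hex_dig_eq _ _ _ hpre hlt]
  simp
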